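-- pv_equiv track=rewrite | github.com/dogcomplex/resonance | tictactoe.py | tictactoe_no_diags
-- ===== SOURCE A (Python) =====
-- def tictactoe_no_diags(board):
--     """TicTacToe variant where diagonals don't count as wins."""
--     win_conditions = [
--         [0, 1, 2], [3, 4, 5], [6, 7, 8],  # Rows
--         [0, 3, 6], [1, 4, 7], [2, 5, 8],  # Columns
--         # No diagonals!
--     ]
--
--     for condition in win_conditions:
--         if board[condition[0]] == board[condition[1]] == board[condition[2]] == '1':
--             return "win1"
--
--     for condition in win_conditions:
--         if board[condition[0]] == board[condition[1]] == board[condition[2]] == '2':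
--             return "win2"
--
--     if '0' not in board:
--         return "draw"
--
--     count_1 = board.count('1')
--     count_2 = board.count('2')
--     if count_1 == count_2:
--         return "ok"
--     if count_1 != count_2 and count_1 != count_2 + 1:
--         return "error"
--
--     return "ok"
-- ===== SOURCE B (Python) =====
-- def tictactoe_no_diags(board):
--     """TicTacToe variant where diagonals don't count as wins."""
--     # Histogram approach: one pass over the 9 cells, tallying per-row and
--     # per-column counts of '1's and '2's; a player wins iff some tally hits 3.
--     rows1 = [0, 0, 0]
--     cols1 = [0, 0, 0]
--     rows2 = [0, 0, 0]
--     cols2 = [0, 0, 0]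
--     for i in range(9):
--         cell = board[i]
--         r, c = divmod(i, 3)
--         rows1[r] += cell == '1'
--         cols1[c] += cell == '1'
--         rows2[r] += cell == '2'
--         cols2[c] += cell == '2'
--     if 3 in rows1 or 3 in cols1:
--         return "win1"
--     if 3 in rows2 or 3 in cols2:
--         return "win2"
--     if '0' not in board:
--         return "draw"
--     n1 = board.count('1')
--     n2 = board.count('2')
--     return "ok" if n1 == n2 or n1 == n2 + 1 else "error"
-- ===== Notes on version B (the rewrite author's own statement) =====
-- stated objective: alternative
-- what changed: B drops A's win_conditions table entirely: one pass over the 9 cells tallies per-row/per-column histograms of '1's and '2's (via i divmod 3), a win is a tally reaching 3; the count-validity chain becomes one positive condition.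
-- outside the precondition, e.g. on tictactoe_no_diags(['1', '1', '1']): A returns 'win1', B raises IndexError
import Mathlib
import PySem

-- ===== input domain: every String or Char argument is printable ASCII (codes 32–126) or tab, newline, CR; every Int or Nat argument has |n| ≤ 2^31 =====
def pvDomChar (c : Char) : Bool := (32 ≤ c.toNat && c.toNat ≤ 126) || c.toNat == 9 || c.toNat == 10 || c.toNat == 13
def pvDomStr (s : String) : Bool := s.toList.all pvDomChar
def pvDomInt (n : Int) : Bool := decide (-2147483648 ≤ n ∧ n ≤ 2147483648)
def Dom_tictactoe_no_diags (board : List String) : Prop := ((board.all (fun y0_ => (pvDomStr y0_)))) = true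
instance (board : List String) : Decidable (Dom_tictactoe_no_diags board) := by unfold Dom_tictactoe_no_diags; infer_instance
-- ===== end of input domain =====

-- B replaces A's six-line win_conditions table by one pass over the 9 cells that tallies
-- per-row/per-column histograms (win = a tally of 3) — an alternative decomposition, same results.

-- ===== PORT A =====
def pvCondsA : List (List Int) :=
  [[0, 1, 2], [3, 4, 5], [6, 7, 8], [0, 3, 6], [1, 4, 7], [2, 5, 8]]

-- 'for condition in win_conditions: if board[c0]==board[c1]==board[c2]==t: return …'
def pvFindWinA (board : List String) (t : String) : List (List Int) → Bool
  | [] => false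
  | cond :: rest =>
    if PySem.List.pyGet? board (PySem.List.pyGetD cond 0 0)
         == PySem.List.pyGet? board (PySem.List.pyGetD cond 1 0)
       && PySem.List.pyGet? board (PySem.List.pyGetD cond 1 0)
         == PySem.List.pyGet? board (PySem.List.pyGetD cond 2 0)
       && PySem.List.pyGet? board (PySem.List.pyGetD cond 2 0) == some t
    then true
    else pvFindWinA board t rest

def tictactoe_no_diags (board : List String) : String :=
  if pvFindWinA board "1" pvCondsA then "win1"
  else if pvFindWinA board "2" pvCondsA then "win2"
  else if !(board.contains "0") then "draw"
  else
    let count_1 := PySem.List.count board "1"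
    let count_2 := PySem.List.count board "2"
    if count_1 == count_2 then "ok"
    else if count_1 != count_2 && count_1 != count_2 + 1 then "error" else "ok"

-- ===== PORT B =====
-- Histogram state (rows1, cols1, rows2, cols2), each a 3-entry tally list.
-- 'rows1[r] += (cell == "1")' is ported as modify with a 0/1 increment (exact: r,c ∈ {0,1,2}, so
-- the Int results of divmod i 3 are nonnegative and .toNat is exact).
def tictactoe_no_diags_alt (board : List String) : String :=
  let st := (PySem.List.pyRange 0 9 1).foldl
    (fun (s : List Nat × List Nat × List Nat × List Nat) i =>
      let cell := PySem.List.pyGet? board i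
      let r := (PySem.Int.floordiv i 3).toNat
      let c := (PySem.Int.mod i 3).toNat
      (s.1.modify r (· + (if cell == some "1" then 1 else 0)),
       s.2.1.modify c (· + (if cell == some "1" then 1 else 0)),
       s.2.2.1.modify r (· + (if cell == some "2" then 1 else 0)),
       s.2.2.2.modify c (· + (if cell == some "2" then 1 else 0))))
    ([0, 0, 0], [0, 0, 0], [0, 0, 0], [0, 0, 0])
  if st.1.contains 3 || st.2.1.contains 3 then "win1"
  else if st.2.2.1.contains 3 || st.2.2.2.contains 3 then "win2"
  else if !(board.contains "0") then "draw"
  else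
    let n1 := PySem.List.count board "1"
    let n2 := PySem.List.count board "2"
    if n1 == n2 || n1 == n2 + 1 then "ok" else "error"

-- ===== PRECONDITION & SPEC =====
-- Pre_ excludes boards with fewer than 9 cells: there A raises IndexError unless an early win line
-- completes before the first out-of-range read, while B, which reads all 9 cells before deciding,
-- raises IndexError on every such board.
def Pre_tictactoe_no_diags (board : List String) : Prop := 9 ≤ board.length
instance (board : List String) : Decidable (Pre_tictactoe_no_diags board) := by
  unfold Pre_tictactoe_no_diags; infer_instance

def pvWitness_tictactoe_no_diags : List String :=
  ["1", "2", "1", "2", "1", "2", "0", "0", "0"]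

def Spec_tictactoe_no_diags (board : List String) (out : String) : Prop := out = tictactoe_no_diags_alt board
instance (board : List String) (out : String) : Decidable (Spec_tictactoe_no_diags board out) := by
  unfold Spec_tictactoe_no_diags; infer_instance

-- ===== CLAIM (what is proved, stated in full; the proofs are below) =====
def Claim_equal_tictactoe_no_diags : Prop := ∀ (board : List String), Dom_tictactoe_no_diags board → Pre_tictactoe_no_diags board → Spec_tictactoe_no_diags board (tictactoe_no_diags board)

-- ===== LEMMAS AND PROOFS =====

-- pyGetD on the three-element literal win conditions evaluates to the stored index.
theorem pv_getD3_0 (a b c : Int) : PySem.List.pyGetD [a, b, c] 0 0 = a := rfl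
theorem pv_getD3_1 (a b c : Int) : PySem.List.pyGetD [a, b, c] 1 0 = b := rfl
theorem pv_getD3_2 (a b c : Int) : PySem.List.pyGetD [a, b, c] 2 0 = c := rfl

-- board[k] on a board destructured into its first nine cells.
theorem pv_g0 (b0 b1 b2 b3 b4 b5 b6 b7 b8 : String) (t : List String) :
    PySem.List.pyGet? (b0::b1::b2::b3::b4::b5::b6::b7::b8::t) 0 = some b0 := by
  rw [show ((0:Int)) = ((0:Nat):Int) from rfl, PySem.List.pyGet?_natCast]; rfl
theorem pv_g1 (b0 b1 b2 b3 b4 b5 b6 b7 b8 : String) (t : List String) :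
    PySem.List.pyGet? (b0::b1::b2::b3::b4::b5::b6::b7::b8::t) 1 = some b1 := by
  rw [show ((1:Int)) = ((1:Nat):Int) from rfl, PySem.List.pyGet?_natCast]; rfl
theorem pv_g2 (b0 b1 b2 b3 b4 b5 b6 b7 b8 : String) (t : List String) :
    PySem.List.pyGet? (b0::b1::b2::b3::b4::b5::b6::b7::b8::t) 2 = some b2 := by
  rw [show ((2:Int)) = ((2:Nat):Int) from rfl, PySem.List.pyGet?_natCast]; rfl
theorem pv_g3 (b0 b1 b2 b3 b4 b5 b6 b7 b8 : String) (t : List String) :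
    PySem.List.pyGet? (b0::b1::b2::b3::b4::b5::b6::b7::b8::t) 3 = some b3 := by
  rw [show ((3:Int)) = ((3:Nat):Int) from rfl, PySem.List.pyGet?_natCast]; rfl
theorem pv_g4 (b0 b1 b2 b3 b4 b5 b6 b7 b8 : String) (t : List String) :
    PySem.List.pyGet? (b0::b1::b2::b3::b4::b5::b6::b7::b8::t) 4 = some b4 := by
  rw [show ((4:Int)) = ((4:Nat):Int) from rfl, PySem.List.pyGet?_natCast]; rfl
theorem pv_g5 (b0 b1 b2 b3 b4 b5 b6 b7 b8 : String) (t : List String) :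
    PySem.List.pyGet? (b0::b1::b2::b3::b4::b5::b6::b7::b8::t) 5 = some b5 := by
  rw [show ((5:Int)) = ((5:Nat):Int) from rfl, PySem.List.pyGet?_natCast]; rfl
theorem pv_g6 (b0 b1 b2 b3 b4 b5 b6 b7 b8 : String) (t : List String) :
    PySem.List.pyGet? (b0::b1::b2::b3::b4::b5::b6::b7::b8::t) 6 = some b6 := by
  rw [show ((6:Int)) = ((6:Nat):Int) from rfl, PySem.List.pyGet?_natCast]; rfl
theorem pv_g7 (b0 b1 b2 b3 b4 b5 b6 b7 b8 : String) (t : List String) :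
    PySem.List.pyGet? (b0::b1::b2::b3::b4::b5::b6::b7::b8::t) 7 = some b7 := by
  rw [show ((7:Int)) = ((7:Nat):Int) from rfl, PySem.List.pyGet?_natCast]; rfl
theorem pv_g8 (b0 b1 b2 b3 b4 b5 b6 b7 b8 : String) (t : List String) :
    PySem.List.pyGet? (b0::b1::b2::b3::b4::b5::b6::b7::b8::t) 8 = some b8 := by
  rw [show ((8:Int)) = ((8:Nat):Int) from rfl, PySem.List.pyGet?_natCast]; rfl

-- Python's chained equality 'x == y == z == t' holds iff all three equal t.
theorem pv_chain_eq (x y z t : Option String) :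
    (x == y && y == z && z == t) = (decide (x = t) && decide (y = t) && decide (z = t)) := by
  rw [Bool.eq_iff_iff]
  simp only [Bool.and_eq_true, beq_iff_eq, decide_eq_true_eq]
  constructor
  · rintro ⟨⟨h1, h2⟩, h3⟩; subst_vars; exact ⟨⟨rfl, rfl⟩, rfl⟩
  · rintro ⟨⟨h1, h2⟩, h3⟩; subst_vars; exact ⟨⟨rfl, rfl⟩, rfl⟩

-- A line's 0/1 tally reaches 3 iff all three cells match.
theorem pv_tally3 (x y z : Option String) (t : String) :
    ((3 : Nat) == 0 + (if x == some t then 1 else 0) + (if y == some t then 1 else 0)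
        + (if z == some t then 1 else 0))
    = (decide (x = some t) && decide (y = some t) && decide (z = some t)) := by
  by_cases hx : x = some t <;> by_cases hy : y = some t <;> by_cases hz : z = some t <;>
    simp [hx, hy, hz]

-- A's equality/inequality chain over the counts equals B's single positive condition.
theorem pv_tail_eq (c1 c2 : Nat) :
    (if c1 == c2 then "ok"
     else if c1 != c2 && c1 != c2 + 1 then "error" else "ok")
    = (if c1 == c2 || c1 == c2 + 1 then "ok" else "error") := by
  by_cases h1 : c1 = c2 <;> by_cases h2 : c1 = c2 + 1 <;> simp_all

-- ===== VERDICT (by name: the statement is the Claim_ definition above) =====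
theorem tictactoe_no_diags_spec : Claim_equal_tictactoe_no_diags := by
  intro board _ hpre
  unfold Pre_tictactoe_no_diags at hpre
  unfold Spec_tictactoe_no_diags
  rcases board with _ | ⟨b0, board⟩
  · simp at hpre
  rcases board with _ | ⟨b1, board⟩
  · simp at hpre
  rcases board with _ | ⟨b2, board⟩
  · simp at hpre
  rcases board with _ | ⟨b3, board⟩
  · simp at hpre
  rcases board with _ | ⟨b4, board⟩
  · simp at hpre
  rcases board with _ | ⟨b5, board⟩
  · simp at hpre
  rcases board with _ | ⟨b6, board⟩
  · simp at hpre
  rcases board with _ | ⟨b7, board⟩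
  · simp at hpre
  rcases board with _ | ⟨b8, board⟩
  · simp at hpre
  unfold tictactoe_no_diags tictactoe_no_diags_alt
  simp only [pvFindWinA, pvCondsA, pv_getD3_0, pv_getD3_1, pv_getD3_2,
    pv_g0, pv_g1, pv_g2, pv_g3, pv_g4, pv_g5, pv_g6, pv_g7, pv_g8,
    show PySem.List.pyRange 0 9 1 = [0,1,2,3,4,5,6,7,8] from rfl,
    List.foldl, List.modify, List.modifyTailIdx, List.modifyTailIdx.go, List.modifyHead,
    show (PySem.Int.floordiv 0 3).toNat = 0 from rfl,
    show (PySem.Int.floordiv 1 3).toNat = 0 from rfl,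
    show (PySem.Int.floordiv 2 3).toNat = 0 from rfl,
    show (PySem.Int.floordiv 3 3).toNat = 1 from rfl,
    show (PySem.Int.floordiv 4 3).toNat = 1 from rfl,
    show (PySem.Int.floordiv 5 3).toNat = 1 from rfl,
    show (PySem.Int.floordiv 6 3).toNat = 2 from rfl,
    show (PySem.Int.floordiv 7 3).toNat = 2 from rfl,
    show (PySem.Int.floordiv 8 3).toNat = 2 from rfl,
    show (PySem.Int.mod 0 3).toNat = 0 from rfl,
    show (PySem.Int.mod 1 3).toNat = 1 from rfl,
    show (PySem.Int.mod 2 3).toNat = 2 from rfl,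
    show (PySem.Int.mod 3 3).toNat = 0 from rfl,
    show (PySem.Int.mod 4 3).toNat = 1 from rfl,
    show (PySem.Int.mod 5 3).toNat = 2 from rfl,
    show (PySem.Int.mod 6 3).toNat = 0 from rfl,
    show (PySem.Int.mod 7 3).toNat = 1 from rfl,
    show (PySem.Int.mod 8 3).toNat = 2 from rfl]
  simp only [pv_chain_eq, pv_tally3, List.contains_cons, List.contains_nil]
  simp only [Bool.if_true_left, Bool.or_assoc, Bool.decide_eq_true, Bool.or_false]
  simp only [pv_tail_eq]
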